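-- pv_equiv track=rewrite | github.com/Saraja98/EC_602 | HW4_weddingRecent1.py | linear
-- ===== SOURCE A (Python) =====
-- def linear(guests):
--             n = len(guests)
--             memory = n*[''] # Creates empty list to store recursion results for future reference
--
--             for x in range(n):
--
--                 # Hardcoding first two levels is necessary for recursion-like behavior
--                 if x == 0:
--                     memory[0] = [guests[0]]
--                 if x == 1:
--                     memory[1] = [guests[0] + guests[1], guests[1] + guests[0]]
--                 if x >= 2:
--
--                     # Adds the next guest to the end of each of the previous levels combinations
--                     # Example: If next guest is d [abc,bac,acb] becomes [abcd,bacd,acbd]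
--                     memory[x] = []
--                     for y in range(len(memory[x-1])):
--                         memory[x].append(memory[x-1][y] + guests[x])
--
--                     # Finds remaining combinations for this level
--                     # Pulls n-2 level and adds the reverse of last two letters to each combination
--                     # Example: For level 3, pulls level 1 [ab, ba] and adds dc to each level 1 entry
--                     last_2_reversed = guests[x] + guests[x-1]
--                     for y in range(len(memory[x-2])):
--                         memory[x].append(memory[x-2][y] + last_2_reversed)
--
--             return memory
-- ===== SOURCE B (Python) =====
-- def linear(guests):
--     cache = {}
--
--     def level(x):
--         if x in cache:
--             return cache[x]
--         if x == 0:
--             res = [guests[0]]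
--         elif x == 1:
--             res = [guests[0] + guests[1], guests[1] + guests[0]]
--         else:
--             res = [s + guests[x] for s in level(x - 1)] + \
--                   [s + guests[x] + guests[x - 1] for s in level(x - 2)]
--         cache[x] = res
--         return res
--
--     return [level(i) for i in range(len(guests))]
-- ===== Notes on version B (the rewrite author's own statement) =====
-- stated objective: alternative
-- what changed: Replaces the bottom-up loop that mutates a preallocated memory list with a memoized top-down recursive helper level(x) (Fibonacci-style two-branch recursion) plus a final comprehension over the levels.
import Mathlib
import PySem

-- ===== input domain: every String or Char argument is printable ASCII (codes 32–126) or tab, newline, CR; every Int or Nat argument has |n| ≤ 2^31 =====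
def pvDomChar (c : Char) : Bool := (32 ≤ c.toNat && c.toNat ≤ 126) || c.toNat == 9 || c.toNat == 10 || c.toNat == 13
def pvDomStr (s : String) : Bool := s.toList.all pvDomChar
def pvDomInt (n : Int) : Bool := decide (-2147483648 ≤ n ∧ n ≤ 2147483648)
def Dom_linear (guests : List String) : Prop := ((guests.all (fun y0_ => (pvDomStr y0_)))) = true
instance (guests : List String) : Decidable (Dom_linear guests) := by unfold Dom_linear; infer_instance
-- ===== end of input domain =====

-- B replaces A's bottom-up loop mutating a preallocated memory list with a memoized recursive level helper; objective: alternative decomposition, same cost.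

-- ===== PORT A =====
-- one loop iteration of A: the body of `for x in range(n)` acting on `memory`
def linearStep (guests : List String) (memory : List (List String)) (x : Nat) : List (List String) :=
  if x == 0 then memory.set 0 [guests.getD 0 ""]
  else if x == 1 then
    memory.set 1 [guests.getD 0 "" ++ guests.getD 1 "", guests.getD 1 "" ++ guests.getD 0 ""]
  else
    -- memory[x] = []; for y in range(len(memory[x-1])): memory[x].append(memory[x-1][y] + guests[x])
    let prev1 := memory.getD (x - 1) []
    let l1 := (List.range prev1.length).foldl
      (fun acc y => acc ++ [prev1.getD y "" ++ guests.getD x ""]) []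
    -- last_2_reversed = guests[x] + guests[x-1]; for y in range(len(memory[x-2])): append
    let last2 := guests.getD x "" ++ guests.getD (x - 1) ""
    let prev2 := memory.getD (x - 2) []
    let l2 := (List.range prev2.length).foldl
      (fun acc y => acc ++ [prev2.getD y "" ++ last2]) l1
    memory.set x l2

def linear (guests : List String) : List (List String) :=
  (List.range guests.length).foldl (linearStep guests) (List.replicate guests.length [])

-- ===== PORT B =====
-- B's memoized recursive helper `level(x)`; memoization is value-transparent, ported as plain recursion
def levelB (guests : List String) : Nat → List String
  | 0 => [guests.getD 0 ""]
  | 1 => [guests.getD 0 "" ++ guests.getD 1 "", guests.getD 1 "" ++ guests.getD 0 ""]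
  | (x + 2) =>
      ((levelB guests (x + 1)).map (fun s => s ++ guests.getD (x + 2) "")) ++
      ((levelB guests x).map (fun s => s ++ guests.getD (x + 2) "" ++ guests.getD (x + 1) ""))

def linear_alt (guests : List String) : List (List String) :=
  (List.range guests.length).map (levelB guests)

-- ===== PRECONDITION & SPEC =====
def Spec_linear (guests : List String) (out : List (List String)) : Prop := out = linear_alt guests
instance (guests : List String) (out : List (List String)) : Decidable (Spec_linear guests out) := by unfold Spec_linear; infer_instance

-- ===== CLAIM (what is proved, stated in full; the proofs are below) =====
def Claim_equal_linear : Prop := ∀ (guests : List String), Dom_linear guests → Spec_linear guests (linear guests)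

-- ===== LEMMAS AND PROOFS =====

-- A's append loop over range(len(l)) starting from `init` builds init ++ l.map f
theorem foldl_range_take (l : List String) (f : String → String) :
    ∀ m, m ≤ l.length → ∀ init,
      (List.range m).foldl (fun acc y => acc ++ [f (l.getD y "")]) init
        = init ++ (l.take m).map f := by
  intro m
  induction m with
  | zero => simp
  | succ k ih =>
    intro hm init
    have hk : k < l.length := by omega
    rw [List.range_succ, List.foldl_append, ih (by omega)]
    simp only [List.foldl_cons, List.foldl_nil]
    rw [List.append_assoc]
    congr 1
    rw [List.take_add_one, List.getElem?_eq_getElem hk]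
    simp [List.getD, List.getElem?_eq_getElem hk]
    have hk' : k < (List.map f l).length := by simpa
    rw [← List.take_concat_get (l := List.map f l) (i := k)]
    · rw [List.concat_eq_append, List.getElem_map]
    · exact hk'

theorem foldl_range_append (l : List String) (f : String → String) (init : List String) :
    (List.range l.length).foldl (fun acc y => acc ++ [f (l.getD y "")]) init
      = init ++ l.map f := by
  simpa using foldl_range_take l f l.length le_rfl init

theorem foldl_range_append1 (l : List String) (t : String) (init : List String) :
    (List.range l.length).foldl (fun acc y => acc ++ [l.getD y "" ++ t]) init
      = init ++ l.map (fun s => s ++ t) := by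
  simpa using foldl_range_append l (fun s => s ++ t) init

theorem getD_range_map (f : Nat → List String) (m i : Nat) (h : i < m) :
    ((List.range m).map f).getD i [] = f i := by
  simp [List.getD, List.getElem?_map, List.getElem?_range h]

theorem set_append_replicate {α : Type} (p : List α) (m : Nat) (a v : α) (h : 0 < m) :
    (p ++ List.replicate m a).set p.length v
      = p ++ v :: List.replicate (m - 1) a := by
  obtain ⟨m', rfl⟩ : ∃ m', m = m' + 1 := ⟨m - 1, by omega⟩
  rw [List.set_append_right _ _ le_rfl]
  simp [List.replicate_succ]

theorem linearStep_zero (g : List String) (h : 0 < g.length) :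
    linearStep g (List.replicate g.length []) 0
      = levelB g 0 :: List.replicate (g.length - 1) [] := by
  obtain ⟨m, hm⟩ : ∃ m, g.length = m + 1 := ⟨g.length - 1, by omega⟩
  simp only [linearStep, hm]
  simp [List.replicate_succ, levelB]

theorem linearStep_one (g : List String) (h : 1 < g.length) :
    linearStep g ([levelB g 0] ++ List.replicate (g.length - 1) []) 1
      = [levelB g 0] ++ levelB g 1 :: List.replicate (g.length - 2) [] := by
  simp only [linearStep, show ((1 : Nat) == 0) = false from rfl, Bool.false_eq_true, if_false,
    beq_self_eq_true, if_true]
  have := set_append_replicate ([levelB g 0] : List (List String)) (g.length - 1) []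
    [g.getD 0 "" ++ g.getD 1 "", g.getD 1 "" ++ g.getD 0 ""] (by omega)
  simp only [List.length_cons, List.length_nil, Nat.zero_add] at this
  rw [this]
  simp [levelB, show g.length - 1 - 1 = g.length - 2 by omega]

theorem linearStep_two (g : List String) (j : Nat) (h : j + 2 < g.length) :
    linearStep g ((List.range (j + 2)).map (levelB g) ++ List.replicate (g.length - (j + 2)) []) (j + 2)
      = (List.range (j + 2)).map (levelB g) ++ levelB g (j + 2) :: List.replicate (g.length - (j + 3)) [] := by
  have hb0 : ((j + 2 : Nat) == 0) = false := by simp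
  have hb1 : ((j + 2 : Nat) == 1) = false := by simp
  simp only [linearStep, hb0, hb1, Bool.false_eq_true, if_false]
  have h1 : ((List.range (j + 2)).map (levelB g) ++ List.replicate (g.length - (j + 2)) ([] : List String)).getD (j + 1) []
      = levelB g (j + 1) := by
    rw [List.getD_append _ _ _ _ (by simp), getD_range_map _ _ _ (by omega)]
  have h2 : ((List.range (j + 2)).map (levelB g) ++ List.replicate (g.length - (j + 2)) ([] : List String)).getD j []
      = levelB g j := by
    rw [List.getD_append _ _ _ _ (by simp), getD_range_map _ _ _ (by omega)]
  rw [show (j + 2) - 1 = j + 1 from rfl, show (j + 2) - 2 = j from rfl, h1, h2,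
    foldl_range_append1 (levelB g (j + 1)) (g.getD (j + 2) ""),
    foldl_range_append1 (levelB g j) (g.getD (j + 2) "" ++ g.getD (j + 1) "")]
  have hset := set_append_replicate ((List.range (j + 2)).map (levelB g))
    (g.length - (j + 2)) ([] : List String)
    (List.map (fun s => s ++ g.getD (j + 2) "") (levelB g (j + 1)) ++
      List.map (fun s => s ++ (g.getD (j + 2) "" ++ g.getD (j + 1) "")) (levelB g j))
    (by omega)
  simp only [List.length_map, List.length_range,
    show g.length - (j + 2) - 1 = g.length - (j + 3) by omega] at hset
  rw [List.nil_append, hset]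
  congr 2
  simp [levelB, String.append_assoc]

-- loop invariant: after k iterations, memory = first k levels ++ untouched padding
theorem linear_inv (g : List String) :
    ∀ k, k ≤ g.length →
      (List.range k).foldl (linearStep g) (List.replicate g.length [])
        = (List.range k).map (levelB g) ++ List.replicate (g.length - k) [] := by
  intro k
  induction k with
  | zero => simp
  | succ k ih =>
    intro hm
    rw [List.range_succ, List.foldl_append, ih (by omega)]
    simp only [List.foldl_cons, List.foldl_nil]
    match k with
    | 0 =>
      simp only [List.range_zero, List.map_nil, List.nil_append, Nat.sub_zero]
      rw [linearStep_zero g (by omega)]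
      simp [levelB]
    | 1 =>
      rw [show (List.range 1).map (levelB g) = [levelB g 0] by simp,
        linearStep_one g (by omega)]
      simp [List.range_succ]
    | (j + 2) =>
      rw [linearStep_two g j (by omega)]
      rw [List.range_succ, List.map_append]
      simp [show g.length - (j + 2 + 1) = g.length - (j + 3) by omega]

-- ===== VERDICT (by name: the statement is the Claim_ definition above) =====
theorem linear_spec : Claim_equal_linear := by
  intro g _
  unfold Spec_linear linear linear_alt
  simpa using linear_inv g g.length le_rfl
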